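-- pv_equiv track=rewrite | github.com/SAHIL511-JJ/leetcode-problems | electronics_shop.py | get_money_spent
-- ===== SOURCE A (Python) =====
-- def get_money_spent(keyboards, drives, b):
--     """
--     Find maximum money that can be spent on one keyboard and one USB drive.
--
--     Args:
--         keyboards: list of keyboard prices
--         drives: list of USB drive prices
--         b: budget
--
--     Returns:
--         Maximum money spent, or -1 if no valid purchase exists
--     """
--     max_spent = -1
--
--     for keyboard_price in keyboards:
--         for drive_price in drives:
--             total = keyboard_price + drive_price
--             if total <= b and total > max_spent:
--                 max_spent = total
--
--     return max_spent
-- ===== SOURCE B (Python) =====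
-- def get_money_spent(keyboards, drives, b):
--     """Max keyboard+drive total within budget b, or -1: sort drives once,
--     binary-search the largest affordable drive per keyboard."""
--     ds = sorted(drives)
--     best = -1
--     for k in keyboards:
--         x = b - k
--         # bisect_right(ds, x) written out (no imports in the original module)
--         lo, hi = 0, len(ds)
--         while lo < hi:
--             mid = (lo + hi) // 2
--             if x < ds[mid]:
--                 hi = mid
--             else:
--                 lo = mid + 1
--         if lo > 0:
--             total = k + ds[lo - 1]
--             if total > best:
--                 best = total
--     return best
-- ===== Notes on version B (the rewrite author's own statement) =====
-- stated objective: faster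
-- what changed: Replaced the quadratic scan over all keyboard/drive pairs by sorting the drives once and binary-searching the largest affordable drive for each keyboard.
import Mathlib
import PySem

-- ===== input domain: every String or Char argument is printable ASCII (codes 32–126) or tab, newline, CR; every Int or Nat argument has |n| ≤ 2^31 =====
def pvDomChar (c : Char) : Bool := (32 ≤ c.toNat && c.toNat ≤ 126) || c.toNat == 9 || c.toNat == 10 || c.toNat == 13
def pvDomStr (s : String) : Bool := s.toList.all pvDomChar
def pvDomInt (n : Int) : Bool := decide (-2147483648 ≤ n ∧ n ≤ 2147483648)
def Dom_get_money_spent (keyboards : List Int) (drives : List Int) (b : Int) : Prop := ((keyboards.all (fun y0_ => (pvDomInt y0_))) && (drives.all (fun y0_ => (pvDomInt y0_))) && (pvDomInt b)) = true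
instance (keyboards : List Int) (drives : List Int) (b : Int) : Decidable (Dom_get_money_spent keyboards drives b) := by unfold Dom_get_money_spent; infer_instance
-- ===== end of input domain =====

-- B sorts the drives once and binary-searches the largest affordable drive per
-- keyboard (O((n+m) log m)) instead of A's scan over all pairs (O(n*m)).

-- ===== PORT A =====
def get_money_spent (keyboards : List Int) (drives : List Int) (b : Int) : Int :=
  keyboards.foldl (fun maxSpent keyboardPrice =>
    drives.foldl (fun ms drivePrice =>
      let total := keyboardPrice + drivePrice
      if total ≤ b ∧ total > ms then total else ms) maxSpent) (-1)

-- ===== PORT B =====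
-- the hand-written while loop in Source B is exactly Python's bisect_right, owned by PySem.List.bisectRight
def get_money_spent_alt (keyboards : List Int) (drives : List Int) (b : Int) : Int :=
  let ds := PySem.List.sorted drives (fun x => x)
  keyboards.foldl (fun best k =>
    let lo := PySem.List.bisectRight ds (b - k)
    if lo > 0 then
      let total := k + ds.getD (lo - 1) 0   -- ds[lo-1]; lo - 1 < ds.length whenever lo > 0
      if total > best then total else best
    else best) (-1)

-- ===== PRECONDITION & SPEC =====
def Spec_get_money_spent (keyboards : List Int) (drives : List Int) (b : Int) (out : Int) : Prop := out = get_money_spent_alt keyboards drives b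
instance (keyboards : List Int) (drives : List Int) (b : Int) (out : Int) : Decidable (Spec_get_money_spent keyboards drives b out) := by unfold Spec_get_money_spent; infer_instance

-- ===== CLAIM (what is proved, stated in full; the proofs are below) =====
def Claim_equal_get_money_spent : Prop := ∀ (keyboards : List Int) (drives : List Int) (b : Int), Dom_get_money_spent keyboards drives b → Spec_get_money_spent keyboards drives b (get_money_spent keyboards drives b)

-- ===== LEMMAS AND PROOFS =====

-- ===== VERDICT (by name: the statement is the Claim_ definition above) =====
-- maxLe ds x = the maximum element of ds that is ≤ x (none if there is none)
def maxLe : List Int → Int → Option Int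
  | [], _ => none
  | d :: ds, x =>
    match maxLe ds x with
    | none => if d ≤ x then some d else none
    | some m => if d ≤ x then some (if d ≤ m then m else d) else some m

-- full characterisation of maxLe, one induction
theorem maxLe_cases (ds : List Int) (x : Int) :
    (maxLe ds x = none ∧ ∀ d ∈ ds, x < d) ∨
    (∃ M, maxLe ds x = some M ∧ M ∈ ds ∧ M ≤ x ∧ ∀ d ∈ ds, d ≤ x → d ≤ M) := by
  induction ds with
  | nil => left; simp [maxLe]
  | cons d ds ih =>
    rcases ih with ⟨hr, hall⟩ | ⟨m, hr, hm, hle, hmax⟩ <;> by_cases hd : d ≤ x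
    · right
      refine ⟨d, by simp [maxLe, hr, hd], List.mem_cons_self, hd, ?_⟩
      intro e he hex
      rcases List.mem_cons.mp he with rfl | he
      · omega
      · have := hall e he; omega
    · left
      refine ⟨by simp [maxLe, hr, hd], ?_⟩
      intro e he
      rcases List.mem_cons.mp he with rfl | he
      · omega
      · exact hall e he
    · right
      refine ⟨if d ≤ m then m else d, by simp [maxLe, hr, hd], ?_, ?_, ?_⟩
      · split_ifs
        · exact List.mem_cons_of_mem _ hm
        · exact List.mem_cons_self
      · split_ifs <;> omega
      · intro e he hex
        rcases List.mem_cons.mp he with rfl | he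
        · split_ifs <;> omega
        · have := hmax e he hex; split_ifs <;> omega
    · right
      refine ⟨m, by simp [maxLe, hr, hd], List.mem_cons_of_mem _ hm, hle, ?_⟩
      intro e he hex
      rcases List.mem_cons.mp he with rfl | he
      · omega
      · exact hmax e he hex

theorem maxLe_none_iff (ds : List Int) (x : Int) :
    maxLe ds x = none ↔ ∀ d ∈ ds, x < d := by
  rcases maxLe_cases ds x with ⟨hr, hall⟩ | ⟨m, hr, hm, hle, -⟩
  · exact ⟨fun _ => hall, fun _ => hr⟩
  · rw [hr]
    simp only [reduceCtorEq, false_iff]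
    intro hall
    have := hall m hm
    omega

theorem maxLe_some_aux (ds : List Int) (x M : Int) (h : maxLe ds x = some M) :
    M ∈ ds ∧ M ≤ x ∧ ∀ d ∈ ds, d ≤ x → d ≤ M := by
  rcases maxLe_cases ds x with ⟨hr, -⟩ | ⟨m, hr, hm, hle, hmax⟩
  · rw [hr] at h; cases h
  · rw [hr] at h
    injection h with h
    subst h
    exact ⟨hm, hle, hmax⟩

theorem maxLe_perm (l₁ l₂ : List Int) (x : Int) (hp : l₁.Perm l₂) :
    maxLe l₁ x = maxLe l₂ x := by
  rcases h1 : maxLe l₁ x with _ | m₁ <;> rcases h2 : maxLe l₂ x with _ | m₂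
  · rfl
  · exfalso
    obtain ⟨hm, hle, -⟩ := maxLe_some_aux _ _ _ h2
    rw [maxLe_none_iff] at h1
    have := h1 m₂ (hp.mem_iff.mpr hm)
    omega
  · exfalso
    obtain ⟨hm, hle, -⟩ := maxLe_some_aux _ _ _ h1
    rw [maxLe_none_iff] at h2
    have := h2 m₁ (hp.mem_iff.mp hm)
    omega
  · obtain ⟨hm1, hle1, hmax1⟩ := maxLe_some_aux _ _ _ h1
    obtain ⟨hm2, hle2, hmax2⟩ := maxLe_some_aux _ _ _ h2
    have a1 := hmax1 m₂ (hp.mem_iff.mpr hm2) hle2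
    have a2 := hmax2 m₁ (hp.mem_iff.mp hm1) hle1
    exact congrArg some (le_antisymm a2 a1)

-- A's inner loop over the drives computes the best total for one keyboard
theorem innerA_eq (k b : Int) (ds : List Int) : ∀ ms : Int,
    (ds.foldl (fun ms drivePrice =>
      let total := k + drivePrice
      if total ≤ b ∧ total > ms then total else ms) ms) =
    (maxLe ds (b - k)).elim ms (fun M => if k + M > ms then k + M else ms) := by
  induction ds with
  | nil => intro ms; simp [maxLe]
  | cons d ds ih =>
    intro ms
    simp only [List.foldl_cons]
    rw [ih]
    rcases hr : maxLe ds (b - k) with _ | m <;>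
      simp only [maxLe, hr] <;>
      by_cases hd : d ≤ b - k <;>
      simp only [hd, if_true, if_false, Option.elim_none, Option.elim_some] <;>
      split_ifs <;> omega

-- on a ≤-sorted list, bisectRight locates maxLe
theorem maxLe_sorted_bisect (ds : List Int) (x : Int)
    (hs : ds.Pairwise (· ≤ ·)) :
    maxLe ds x =
      if 0 < PySem.List.bisectRight ds x then
        some (ds.getD (PySem.List.bisectRight ds x - 1) 0)
      else none := by
  obtain ⟨hlen, hlo, hhi⟩ := PySem.List.bisectRight_spec ds x hs
  set lo := PySem.List.bisectRight ds x with hlodef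
  split_ifs with h
  · have hidx : lo - 1 < ds.length := by omega
    rw [List.getD_eq_getElem ds 0 hidx]
    have hle : ds[lo-1] ≤ x := hlo (lo-1) hidx (by omega)
    rcases hm : maxLe ds x with _ | m
    · rw [maxLe_none_iff] at hm
      have := hm ds[lo-1] (List.getElem_mem hidx)
      omega
    · obtain ⟨hmem, hmle, hmax⟩ := maxLe_some_aux _ _ _ hm
      have h1 : ds[lo-1] ≤ m := hmax _ (List.getElem_mem hidx) hle
      obtain ⟨i, hi, hie⟩ := List.getElem_of_mem hmem
      have hilt : i < lo := by
        by_contra hge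
        have := hhi i hi (by omega)
        omega
      have h2 : m ≤ ds[lo-1] := by
        rcases Nat.lt_or_ge i (lo-1) with hc | hc
        · have := List.pairwise_iff_getElem.mp hs i (lo-1) hi hidx hc
          omega
        · have : i = lo - 1 := by omega
          subst this
          omega
      exact congrArg some (by omega)
  · rw [maxLe_none_iff]
    intro d hd
    obtain ⟨i, hi, rfl⟩ := List.getElem_of_mem hd
    exact hhi i hi (by omega)

-- ===== VERDICT (by name: the statement is the Claim_ definition above) =====
theorem get_money_spent_spec : Claim_equal_get_money_spent := by
  intro keyboards drives b _
  unfold Spec_get_money_spent get_money_spent get_money_spent_alt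
  set ds := PySem.List.sorted drives (fun x => x) with hds
  have hperm : ds.Perm drives := PySem.List.sorted_perm drives (fun x => x) false
  have hsorted : ds.Pairwise (· ≤ ·) := PySem.List.sorted_pairwise drives (fun x => x)
  have hstep : ∀ (ms k : Int),
      (drives.foldl (fun ms drivePrice =>
        let total := k + drivePrice
        if total ≤ b ∧ total > ms then total else ms) ms) =
      (let lo := PySem.List.bisectRight ds (b - k)
       if lo > 0 then
         let total := k + ds.getD (lo - 1) 0
         if total > ms then total else ms
       else ms) := by
    intro ms k
    rw [innerA_eq, maxLe_perm drives ds (b - k) hperm.symm,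
        maxLe_sorted_bisect ds (b - k) hsorted]
    by_cases h : 0 < PySem.List.bisectRight ds (b - k) <;>
      simp only [gt_iff_lt, h, if_true, if_false, Option.elim_some, Option.elim_none]
  have hfun : (fun (maxSpent keyboardPrice : Int) =>
      drives.foldl (fun ms drivePrice =>
        let total := keyboardPrice + drivePrice
        if total ≤ b ∧ total > ms then total else ms) maxSpent) =
      (fun (best k : Int) =>
        let lo := PySem.List.bisectRight ds (b - k)
        if lo > 0 then
          let total := k + ds.getD (lo - 1) 0
          if total > best then total else best
        else best) :=
    funext fun ms => funext fun k => hstep ms k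
  rw [hfun]
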